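-- pv_equiv track=rewrite | github.com/rtasan/FindAspectRatio | MoreFtr.py | get_aspect
-- ===== SOURCE A (Python) =====
-- def get_aspect(m, n):
--     w = m
--     h = n
--     while n > 0:
--         tmp = n
--         n = m % n
--         m = tmp
--
--     return w//m, h//m
-- ===== SOURCE B (Python) =====
-- def get_aspect(m, n):
--     def gcd(a, b):
--         return a if b <= 0 else gcd(b, a % b)
--     g = gcd(m, n)
--     return m // g, n // g
-- ===== Notes on version B (the rewrite author's own statement) =====
-- stated objective: simpler
-- what changed: Replaces the explicit while-loop with mutable swap variables by a recursive gcd helper and a single division step; same Euclid algorithm, different decomposition.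
import Mathlib
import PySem

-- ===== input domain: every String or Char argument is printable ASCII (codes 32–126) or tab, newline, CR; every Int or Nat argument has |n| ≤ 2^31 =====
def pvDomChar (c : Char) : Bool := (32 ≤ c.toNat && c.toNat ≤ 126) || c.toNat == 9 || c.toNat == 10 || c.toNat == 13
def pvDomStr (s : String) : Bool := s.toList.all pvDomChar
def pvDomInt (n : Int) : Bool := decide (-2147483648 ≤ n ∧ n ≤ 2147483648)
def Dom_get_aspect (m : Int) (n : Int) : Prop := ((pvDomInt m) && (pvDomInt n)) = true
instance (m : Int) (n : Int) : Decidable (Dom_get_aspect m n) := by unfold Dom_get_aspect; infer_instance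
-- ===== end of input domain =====

-- B replaces A's while-loop with mutable swap variables by a recursive gcd helper; same Euclid algorithm, different decomposition (objective: simpler).


-- ===== PORT A =====
-- the while loop: state (m, n); while n > 0: tmp = n; n = m % n; m = tmp.  Returns final m.
def getAspectLoop (m n : Int) : Int :=
  if h : n > 0 then
    getAspectLoop n (PySem.Int.mod m n)
  else m
termination_by n.toNat
decreasing_by
  have h1 := PySem.Int.mod_nonneg m h
  have h2 := PySem.Int.mod_lt m h
  omega

def get_aspect (m : Int) (n : Int) : Int × Int :=
  let w := m
  let h := n
  let mFinal := getAspectLoop m n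
  (PySem.Int.floordiv w mFinal, PySem.Int.floordiv h mFinal)

-- ===== PORT B =====
-- def gcd(a, b): return a if b <= 0 else gcd(b, a % b)
def gcdB (a b : Int) : Int :=
  if h : b ≤ 0 then a else gcdB b (PySem.Int.mod a b)
termination_by b.toNat
decreasing_by
  have hb : 0 < b := by omega
  have h1 := PySem.Int.mod_nonneg a hb
  have h2 := PySem.Int.mod_lt a hb
  omega

def get_aspect_alt (m : Int) (n : Int) : Int × Int :=
  let g := gcdB m n
  (PySem.Int.floordiv m g, PySem.Int.floordiv n g)

-- ===== PRECONDITION & SPEC =====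
-- Pre_ excludes exactly m = 0 ∧ n ≤ 0, where the final divisor is 0 and A raises ZeroDivisionError.
def Pre_get_aspect (m : Int) (n : Int) : Prop := ¬(m = 0 ∧ n ≤ 0)
instance (m : Int) (n : Int) : Decidable (Pre_get_aspect m n) := by unfold Pre_get_aspect; infer_instance
def pvWitness_get_aspect : Int × Int := (16, 9)

def Spec_get_aspect (m : Int) (n : Int) (out : Int × Int) : Prop := out = get_aspect_alt m n
instance (m : Int) (n : Int) (out : Int × Int) : Decidable (Spec_get_aspect m n out) := by unfold Spec_get_aspect; infer_instance

-- ===== CLAIM (what is proved, stated in full; the proofs are below) =====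
def Claim_equal_get_aspect : Prop := ∀ (m : Int) (n : Int), Dom_get_aspect m n → Pre_get_aspect m n → Spec_get_aspect m n (get_aspect m n)

-- ===== LEMMAS AND PROOFS =====
theorem getAspectLoop_eq_gcdB (m n : Int) : getAspectLoop m n = gcdB m n := by
  rw [getAspectLoop, gcdB]
  split_ifs with h1 h2
  · omega
  · exact getAspectLoop_eq_gcdB n (PySem.Int.mod m n)
  · rfl
  · omega
termination_by n.toNat
decreasing_by
  have h1' := PySem.Int.mod_nonneg m h1
  have h2' := PySem.Int.mod_lt m h1
  omega

-- ===== VERDICT (by name: the statement is the Claim_ definition above) =====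
theorem get_aspect_spec : Claim_equal_get_aspect := by
  intro m n _ _
  unfold Spec_get_aspect get_aspect get_aspect_alt
  rw [getAspectLoop_eq_gcdB]
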